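-- pv_equiv track=rewrite | github.com/vojtob/ify | src/utils/rect_recognition.py | findBottomEdge
-- ===== SOURCE A (Python) =====
-- def findBottomEdge(startX, endX, startY, cornerGap, lineSegmentsHorizontal):
--     yKeys = lineSegmentsHorizontal.keys()
--     for y in sorted(yKeys):
--         if(y < (startY-cornerGap)):
--             # too small
--             continue
--         if(y > (startY+cornerGap)):
--             # too big
--             return None
--         # this y is in interval, find by left and right ends
--         horizontalEgdeCandidates = lineSegmentsHorizontal[y]
--         for edge in horizontalEgdeCandidates:
--             if(edge[0] < (startX-cornerGap)):
--                 # too high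
--                 continue
--             if(edge[0] > (startX+cornerGap)):
--                 # too low
--                 # return None
--                 break
--             # left corner OK, check right corner
--             if(edge[1] < (endX-cornerGap)):
--                 # too small
--                 # return None
--                 break
--             if(edge[1] > (endX+cornerGap)):
--                 # too big
--                 # return None
--                 break
--             return (y, edge)
-- ===== SOURCE B (Python) =====
-- def findBottomEdge(startX, endX, startY, cornerGap, lineSegmentsHorizontal):
--     # No sorting: one unordered pass over the dict collects, for every y in the
--     # vertical window, the row's decisive edge (the first edge whose left end is
--     # >= startX-cornerGap) when it passes the corner tests; the answer is the
--     # collected match with the smallest y (A scans sorted ys and stops at the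
--     # first match / first y above the window, which is exactly that minimum).
--     matches = []
--     for y, edges in lineSegmentsHorizontal.items():
--         if startY - cornerGap <= y <= startY + cornerGap:
--             decisive = next((e for e in edges if e[0] >= startX - cornerGap), None)
--             if decisive is not None and decisive[0] <= startX + cornerGap \
--                     and endX - cornerGap <= decisive[1] <= endX + cornerGap:
--                 matches.append((y, decisive))
--     return min(matches, key=lambda m: m[0]) if matches else None
-- ===== Notes on version B (the rewrite author's own statement) =====
-- stated objective: alternative
-- what changed: B drops the sort and the early-return scan entirely: one unordered pass over the dict collects, per in-window y, the row's decisive edge (first edge with left end >= startX-cornerGap) when it passes the corner tests, and the result is the collected match of minimum y - equal to A's first hit in sorted order since keys above the window only ever make A return None after all window keys.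
import Mathlib
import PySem

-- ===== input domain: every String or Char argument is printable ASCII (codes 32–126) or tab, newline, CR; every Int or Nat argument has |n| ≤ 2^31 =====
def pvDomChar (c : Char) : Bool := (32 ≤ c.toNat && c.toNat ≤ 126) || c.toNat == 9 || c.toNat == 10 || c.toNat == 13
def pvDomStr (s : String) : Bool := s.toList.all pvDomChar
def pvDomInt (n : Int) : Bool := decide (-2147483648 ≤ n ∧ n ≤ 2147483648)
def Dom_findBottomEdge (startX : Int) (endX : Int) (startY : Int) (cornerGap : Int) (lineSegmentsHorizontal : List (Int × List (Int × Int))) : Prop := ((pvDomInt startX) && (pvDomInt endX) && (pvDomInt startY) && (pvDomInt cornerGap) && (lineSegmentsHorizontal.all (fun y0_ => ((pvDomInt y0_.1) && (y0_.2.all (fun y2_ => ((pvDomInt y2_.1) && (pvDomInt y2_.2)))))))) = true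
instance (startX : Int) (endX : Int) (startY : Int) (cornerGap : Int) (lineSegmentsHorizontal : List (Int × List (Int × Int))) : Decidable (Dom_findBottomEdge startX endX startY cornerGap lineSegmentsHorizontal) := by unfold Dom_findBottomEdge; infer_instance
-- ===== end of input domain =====

-- B (alternative): instead of scanning sorted keys with early return, B makes one unordered pass
-- collecting each in-window row's decisive-edge match and returns the match with minimum y.

-- ===== PORT A =====
-- A walks sorted(keys): inner 'for edge in …' loop (break and loop exhaustion both fall back to the outer loop → none)
def pvInnerA (startX : Int) (endX : Int) (cornerGap : Int) (y : Int) : List (Int × Int) → Option (Int × (Int × Int))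
  | [] => none
  | e :: rest =>
    if e.1 < startX - cornerGap then pvInnerA startX endX cornerGap y rest   -- continue
    else if e.1 > startX + cornerGap then none                               -- break
    else if e.2 < endX - cornerGap then none                                 -- break
    else if e.2 > endX + cornerGap then none                                 -- break
    else some (y, e)

-- outer 'for y in sorted(yKeys)' loop of A
def pvOuterA (startX : Int) (endX : Int) (startY : Int) (cornerGap : Int)
    (d : PySem.Dict Int (List (Int × Int))) : List Int → Option (Int × (Int × Int))
  | [] => none
  | y :: rest =>
    if y < startY - cornerGap then pvOuterA startX endX startY cornerGap d rest
    else if y > startY + cornerGap then none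
    else match pvInnerA startX endX cornerGap y (d.getD y []) with
      | some r => some r
      | none => pvOuterA startX endX startY cornerGap d rest

def findBottomEdge (startX : Int) (endX : Int) (startY : Int) (cornerGap : Int) (lineSegmentsHorizontal : List (Int × List (Int × Int))) : Option (Int × (Int × Int)) :=
  let d := PySem.Dict.ofList lineSegmentsHorizontal
  pvOuterA startX endX startY cornerGap d (PySem.List.sorted d.keys (fun x => x) false)

-- ===== PORT B =====
-- B: no sort — one unordered pass over dict.items() collecting each in-window row's match ('matches.append(…)')
def pvCollectB (startX : Int) (endX : Int) (startY : Int) (cornerGap : Int) :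
    List (Int × List (Int × Int)) → List (Int × (Int × Int))
  | [] => []
  | (y, edges) :: rest =>
    (if startY - cornerGap ≤ y ∧ y ≤ startY + cornerGap then
      -- decisive = next((e for e in edges if e[0] >= startX - cornerGap), None)
      match edges.find? (fun e => startX - cornerGap ≤ e.1) with
      | some e =>
        if e.1 ≤ startX + cornerGap ∧ endX - cornerGap ≤ e.2 ∧ e.2 ≤ endX + cornerGap then
          [(y, e)]
        else []
      | none => []
    else []) ++ pvCollectB startX endX startY cornerGap rest

def findBottomEdge_alt (startX : Int) (endX : Int) (startY : Int) (cornerGap : Int) (lineSegmentsHorizontal : List (Int × List (Int × Int))) : Option (Int × (Int × Int)) :=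
  let d := PySem.Dict.ofList lineSegmentsHorizontal
  let ms := pvCollectB startX endX startY cornerGap d.items
  -- min(matches, key=lambda m: m[0]) if matches else None
  PySem.List.min? ms (fun m => m.1)

-- ===== PRECONDITION & SPEC =====
def Spec_findBottomEdge (startX : Int) (endX : Int) (startY : Int) (cornerGap : Int) (lineSegmentsHorizontal : List (Int × List (Int × Int))) (out : Option (Int × (Int × Int))) : Prop := out = findBottomEdge_alt startX endX startY cornerGap lineSegmentsHorizontal
instance (startX : Int) (endX : Int) (startY : Int) (cornerGap : Int) (lineSegmentsHorizontal : List (Int × List (Int × Int))) (out : Option (Int × (Int × Int))) : Decidable (Spec_findBottomEdge startX endX startY cornerGap lineSegmentsHorizontal out) := by unfold Spec_findBottomEdge; infer_instance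

-- ===== CLAIM (what is proved, stated in full; the proofs are below) =====
def Claim_equal_findBottomEdge : Prop := ∀ (startX : Int) (endX : Int) (startY : Int) (cornerGap : Int) (lineSegmentsHorizontal : List (Int × List (Int × Int))), Dom_findBottomEdge startX endX startY cornerGap lineSegmentsHorizontal → Spec_findBottomEdge startX endX startY cornerGap lineSegmentsHorizontal (findBottomEdge startX endX startY cornerGap lineSegmentsHorizontal)

-- ===== LEMMAS AND PROOFS =====

-- the per-row decision both programs make for a key y with edge list es
def pvMatch (startX endX startY cornerGap y : Int) (es : List (Int × Int)) : Option (Int × (Int × Int)) :=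
  if startY - cornerGap ≤ y ∧ y ≤ startY + cornerGap then
    match es.find? (fun e => startX - cornerGap ≤ e.1) with
    | some e =>
      if e.1 ≤ startX + cornerGap ∧ endX - cornerGap ≤ e.2 ∧ e.2 ≤ endX + cornerGap then
        some (y, e)
      else none
    | none => none
  else none

theorem pvMatch_fst (startX endX startY cornerGap y : Int) (es : List (Int × Int))
    (r : Int × (Int × Int)) (h : pvMatch startX endX startY cornerGap y es = some r) : r.1 = y := by
  unfold pvMatch at h
  split at h
  · split at h
    · split at h
      · cases h; rfl
      · cases h
    · cases h
  · cases h

-- A's inner loop is decided by the first edge whose left end is ≥ startX - cornerGap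
theorem pvInnerA_eq_match (startX endX startY cornerGap y : Int) (es : List (Int × Int))
    (hw : startY - cornerGap ≤ y ∧ y ≤ startY + cornerGap) :
    pvInnerA startX endX cornerGap y es = pvMatch startX endX startY cornerGap y es := by
  unfold pvMatch
  rw [if_pos hw]
  induction es with
  | nil => simp [pvInnerA]
  | cons e rest ih =>
    by_cases h1 : e.1 < startX - cornerGap
    · have hd : (decide (startX - cornerGap ≤ e.1)) = false := by
        simp only [decide_eq_false_iff_not]; omega
      simp only [pvInnerA, if_pos h1, List.find?_cons, hd, ih]
    · have hd : (decide (startX - cornerGap ≤ e.1)) = true := by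
        simp only [decide_eq_true_eq]; omega
      simp only [pvInnerA, if_neg h1, List.find?_cons, hd]
      by_cases h2 : e.1 > startX + cornerGap
      · simp only [if_pos h2]; rw [if_neg]; omega
      · simp only [if_neg h2]
        by_cases h3 : e.2 < endX - cornerGap
        · simp only [if_pos h3]; rw [if_neg]; omega
        · simp only [if_neg h3]
          by_cases h4 : e.2 > endX + cornerGap
          · simp only [if_pos h4]; rw [if_neg]; omega
          · simp only [if_neg h4]; rw [if_pos]; omega

theorem pvMatch_of_not_window (startX endX startY cornerGap y : Int) (es : List (Int × Int))
    (h : ¬ (startY - cornerGap ≤ y ∧ y ≤ startY + cornerGap)) :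
    pvMatch startX endX startY cornerGap y es = none := by
  unfold pvMatch; rw [if_neg h]

-- A's outer loop over a ≤-sorted key list is head-of-filterMap of the per-row decision
theorem pvOuterA_eq_head (startX endX startY cornerGap : Int)
    (d : PySem.Dict Int (List (Int × Int))) (ys : List Int)
    (hs : ys.Pairwise (· ≤ ·)) :
    pvOuterA startX endX startY cornerGap d ys =
      (ys.filterMap (fun y => pvMatch startX endX startY cornerGap y (d.getD y []))).head? := by
  induction ys with
  | nil => rfl
  | cons y rest ih =>
    rw [List.pairwise_cons] at hs
    obtain ⟨hle, hrest⟩ := hs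
    by_cases h1 : y < startY - cornerGap
    · rw [List.filterMap_cons_none (by exact pvMatch_of_not_window _ _ _ _ _ _ (by omega))]
      simp only [pvOuterA, if_pos h1]
      exact ih hrest
    · by_cases h2 : y > startY + cornerGap
      · simp only [pvOuterA, if_neg h1, if_pos h2]
        have : (List.filterMap (fun y => pvMatch startX endX startY cornerGap y (d.getD y [])) (y :: rest)) = [] := by
          rw [List.filterMap_eq_nil_iff]
          intro a ha
          rcases List.mem_cons.mp ha with h | h
          · subst h; exact pvMatch_of_not_window _ _ _ _ _ _ (by omega)
          · exact pvMatch_of_not_window _ _ _ _ _ _ (by have := hle a h; omega)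
        rw [this]; rfl
      · have hw : startY - cornerGap ≤ y ∧ y ≤ startY + cornerGap := by omega
        simp only [pvOuterA, if_neg h1, if_neg h2,
          pvInnerA_eq_match startX endX startY cornerGap y (d.getD y []) hw]
        cases hm : pvMatch startX endX startY cornerGap y (d.getD y []) with
        | some r => simp only [List.filterMap_cons, hm]; rfl
        | none => simp only [List.filterMap_cons, hm]; exact ih hrest

-- B's collecting pass is the same filterMap, over the items list
theorem pvCollectB_eq_filterMap (startX endX startY cornerGap : Int)
    (l : List (Int × List (Int × Int))) :
    pvCollectB startX endX startY cornerGap l =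
      l.filterMap (fun p => pvMatch startX endX startY cornerGap p.1 p.2) := by
  induction l with
  | nil => rfl
  | cons p rest ih =>
    obtain ⟨y, edges⟩ := p
    show (if _ then _ else []) ++ _ = _
    rw [List.filterMap_cons, ih]
    simp only [pvMatch]
    by_cases hw : startY - cornerGap ≤ y ∧ y ≤ startY + cornerGap
    · rw [if_pos hw, if_pos hw]
      cases hf : edges.find? (fun e => startX - cornerGap ≤ e.1) with
      | some e =>
        dsimp only
        by_cases hc : e.1 ≤ startX + cornerGap ∧ endX - cornerGap ≤ e.2 ∧ e.2 ≤ endX + cornerGap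
        · rw [if_pos hc, if_pos hc]; rfl
        · rw [if_neg hc, if_neg hc]; rfl
      | none => rfl
    · rw [if_neg hw, if_neg hw]; rfl

-- min-by-first-component of any permutation of a list strictly sorted on .1 is its head
theorem min?_eq_head_of_perm (L M : List (Int × (Int × Int)))
    (hperm : L.Perm M) (hsort : L.Pairwise (fun a b => a.1 < b.1)) :
    PySem.List.min? M (fun m => m.1) = L.head? := by
  cases L with
  | nil =>
    rw [hperm.symm.eq_nil]; rfl
  | cons m t =>
    have hMne : M ≠ [] := by
      intro h; subst h
      exact absurd hperm.length_eq (by simp)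
    cases hmin : PySem.List.min? M (fun m => m.1) with
    | none => exact absurd ((PySem.List.min?_eq_none_iff M _).mp hmin) hMne
    | some m' =>
      have hm'M : m' ∈ M := PySem.List.min?_mem hmin
      have hm'L : m' ∈ m :: t := hperm.symm.subset hm'M
      have hle : ∀ y ∈ M, m'.1 ≤ y.1 := PySem.List.min?_isMin hmin
      have hmM : m ∈ M := hperm.subset (List.mem_cons_self ..)
      have h1 : m'.1 ≤ m.1 := hle m hmM
      rcases List.mem_cons.mp hm'L with h | h
      · subst h; rfl
      · exact absurd h1 (by have := (List.pairwise_cons.mp hsort).1 m' h; omega)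

-- ===== VERDICT (by name: the statement is the Claim_ definition above) =====
theorem findBottomEdge_spec : Claim_equal_findBottomEdge := by
  intro startX endX startY cornerGap l _
  unfold Spec_findBottomEdge findBottomEdge findBottomEdge_alt
  dsimp only
  set d := PySem.Dict.ofList l with hd
  set F := fun y => pvMatch startX endX startY cornerGap y (d.getD y []) with hF
  have hnodup : d.keys.Nodup := PySem.Dict.nodup_keys_ofList l
  -- A side
  have hsorted : (PySem.List.sorted d.keys (fun x => x) false).Pairwise (· ≤ ·) :=
    PySem.List.sorted_pairwise d.keys (fun x => x)
  rw [pvOuterA_eq_head startX endX startY cornerGap d _ hsorted]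
  -- B side: items.filterMap = keys.filterMap F
  rw [pvCollectB_eq_filterMap]
  have hitems : d.items.filterMap (fun p => pvMatch startX endX startY cornerGap p.1 p.2) =
      d.keys.filterMap F := by
    have h1 : d.items.filterMap (fun p => pvMatch startX endX startY cornerGap p.1 p.2) =
        d.items.filterMap (fun p => F p.1) := by
      apply List.filterMap_congr
      intro p hp
      have : d.getD p.1 [] = p.2 :=
        PySem.Dict.getD_of_mem_items d (by exact hp) hnodup []
      simp only [hF, this]
    rw [h1]
    show _ = (d.items.map (·.1)).filterMap F
    rw [List.filterMap_map]
    rfl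
  rw [hitems]
  -- relate sorted-keys filterMap and keys filterMap by min?_eq_head_of_perm
  apply Eq.symm
  apply min?_eq_head_of_perm
  · exact List.Perm.filterMap F (PySem.List.sorted_perm d.keys (fun x => x) false)
  · have hnodup' : (PySem.List.sorted d.keys (fun x => x) false).Nodup :=
      ((PySem.List.sorted_perm d.keys (fun x => x) false).symm).nodup hnodup
    have hlt : (PySem.List.sorted d.keys (fun x => x) false).Pairwise (· < ·) := by
      have := List.Pairwise.and hsorted hnodup'
      exact this.imp (fun h => lt_of_le_of_ne h.1 h.2)
    rw [List.pairwise_filterMap]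
    apply hlt.imp
    intro a b hab r hr r' hr'
    rw [pvMatch_fst startX endX startY cornerGap a _ r hr,
        pvMatch_fst startX endX startY cornerGap b _ r' hr']
    exact hab
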